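-- pv_equiv track=rewrite | github.com/KubaJerz/puff | paper00/src/eval_scripts/eval_at_puff_level.py | find_puff_regions
-- ===== SOURCE A (Python) =====
-- def find_puff_regions(binary_array):
--     """Find connected regions (puffs) in binary array."""
--     if len(binary_array) == 0:
--         return []
--
--     puff_regions = []
--     in_puff = False
--     start_idx = 0
--
--     for i, val in enumerate(binary_array):
--         if val == 1 and not in_puff:
--             start_idx = i
--             in_puff = True
--         elif val == 0 and in_puff:
--             puff_regions.append((start_idx, i - 1))
--             in_puff = False
--
--     # Handle case where array ends with a puff
--     if in_puff:
--         puff_regions.append((start_idx, len(binary_array) - 1))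
--
--     return puff_regions
-- ===== SOURCE B (Python) =====
-- def find_puff_regions(binary_array):
--     """Find connected regions (puffs) in binary array.
--
--     Two-pass approach: forward-fill an effective 0/1 state sequence,
--     then detect rising/falling edges in a boundary scan.
--     """
--     states = []
--     cur = 0
--     for v in binary_array:
--         if v == 1:
--             cur = 1
--         elif v == 0:
--             cur = 0
--         states.append(cur)
--
--     regions = []
--     start = 0
--     prev = 0
--     for i, s in enumerate(states):
--         if s == 1 and prev == 0:
--             start = i
--         elif s == 0 and prev == 1:
--             regions.append((start, i - 1))
--         prev = s
--     if prev == 1: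
--         regions.append((start, len(states) - 1))
--     return regions
-- ===== Notes on version B (the rewrite author's own statement) =====
-- stated objective: alternative
-- what changed: Replaces the single in_puff-flag state machine with a two-pass shape: forward-fill a derived 0/1 effective-state sequence, then collect regions by detecting rising and falling edges in that sequence.
import Mathlib
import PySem

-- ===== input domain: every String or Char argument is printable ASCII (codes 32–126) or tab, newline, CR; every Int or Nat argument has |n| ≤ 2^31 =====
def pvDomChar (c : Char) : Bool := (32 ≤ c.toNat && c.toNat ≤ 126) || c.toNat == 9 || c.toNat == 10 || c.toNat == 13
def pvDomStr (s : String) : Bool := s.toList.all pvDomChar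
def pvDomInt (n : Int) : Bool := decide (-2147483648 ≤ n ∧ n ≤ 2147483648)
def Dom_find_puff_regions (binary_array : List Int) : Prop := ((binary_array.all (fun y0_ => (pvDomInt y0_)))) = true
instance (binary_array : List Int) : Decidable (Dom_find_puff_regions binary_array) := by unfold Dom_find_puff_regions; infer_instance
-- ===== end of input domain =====

-- B replaces A's in_puff flag loop with a forward-filled state sequence plus an edge-detecting boundary scan (alternative decomposition, same cost).
-- ===== PORT A =====
def pvA_loop : List Int → Int → List (Int × Int) → Bool → Int → (List (Int × Int) × Bool × Int)
  | [], _, acc, in_puff, start_idx => (acc, in_puff, start_idx)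
  | v :: t, i, acc, in_puff, start_idx =>
    if v = 1 ∧ in_puff = false then pvA_loop t (i + 1) acc true i
    else if v = 0 ∧ in_puff = true then pvA_loop t (i + 1) (acc ++ [(start_idx, i - 1)]) false start_idx
    else pvA_loop t (i + 1) acc in_puff start_idx

def find_puff_regions (binary_array : List Int) : List (Int × Int) :=
  if binary_array.length = 0 then []
  else
    let r := pvA_loop binary_array 0 [] false 0
    if r.2.1 then r.1 ++ [(r.2.2, (binary_array.length : Int) - 1)] else r.1

-- ===== PORT B =====
def pvB_fill : List Int → Int → List Int
  | [], _ => []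
  | v :: t, cur =>
    let cur' := if v = 1 then 1 else if v = 0 then 0 else cur
    cur' :: pvB_fill t cur'

def pvB_scan : List Int → Int → List (Int × Int) → Int → Int → (List (Int × Int) × Int × Int)
  | [], _, acc, start, prev => (acc, start, prev)
  | s :: t, i, acc, start, prev =>
    if s = 1 ∧ prev = 0 then pvB_scan t (i + 1) acc i s
    else if s = 0 ∧ prev = 1 then pvB_scan t (i + 1) (acc ++ [(start, i - 1)]) start s
    else pvB_scan t (i + 1) acc start s

def find_puff_regions_alt (binary_array : List Int) : List (Int × Int) :=
  let states := pvB_fill binary_array 0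
  let r := pvB_scan states 0 [] 0 0
  if r.2.2 = 1 then r.1 ++ [(r.2.1, (states.length : Int) - 1)] else r.1

-- ===== PRECONDITION & SPEC =====
def Spec_find_puff_regions (binary_array : List Int) (out : List (Int × Int)) : Prop := out = find_puff_regions_alt binary_array
instance (binary_array : List Int) (out : List (Int × Int)) : Decidable (Spec_find_puff_regions binary_array out) := by unfold Spec_find_puff_regions; infer_instance

-- ===== CLAIM (what is proved, stated in full; the proofs are below) =====
def Claim_equal_find_puff_regions : Prop := ∀ (binary_array : List Int), Dom_find_puff_regions binary_array → Spec_find_puff_regions binary_array (find_puff_regions binary_array)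

-- ===== LEMMAS AND PROOFS =====

lemma pvB_fill_length (l : List Int) (c : Int) : (pvB_fill l c).length = l.length := by
  induction l generalizing c with
  | nil => rfl
  | cons v t ih => simp [pvB_fill, ih]

lemma pv_key (l : List Int) (i : Int) (acc : List (Int × Int)) (start : Int) (b : Bool) :
    pvB_scan (pvB_fill l (if b then 1 else 0)) i acc start (if b then 1 else 0) =
      ((pvA_loop l i acc b start).1,
       (pvA_loop l i acc b start).2.2,
       if (pvA_loop l i acc b start).2.1 then 1 else 0) := by
  induction l generalizing i acc start b with
  | nil => simp [pvB_fill, pvB_scan, pvA_loop]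
  | cons v t ih =>
    by_cases h1 : v = 1
    · cases b with
      | false =>
        simpa [pvB_fill, pvB_scan, pvA_loop, h1] using ih (i + 1) acc i true
      | true =>
        simpa [pvB_fill, pvB_scan, pvA_loop, h1] using ih (i + 1) acc start true
    · by_cases h0 : v = 0
      · cases b with
        | false =>
          simpa [pvB_fill, pvB_scan, pvA_loop, h0, h1] using ih (i + 1) acc start false
        | true =>
          simpa [pvB_fill, pvB_scan, pvA_loop, h0, h1] using
            ih (i + 1) (acc ++ [(start, i - 1)]) start false
      · cases b with
        | false =>
          simpa [pvB_fill, pvB_scan, pvA_loop, h0, h1] using ih (i + 1) acc start false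
        | true =>
          simpa [pvB_fill, pvB_scan, pvA_loop, h0, h1] using ih (i + 1) acc start true

-- ===== VERDICT (by name: the statement is the Claim_ definition above) =====
theorem find_puff_regions_spec : Claim_equal_find_puff_regions := by
  intro l _
  unfold Spec_find_puff_regions find_puff_regions find_puff_regions_alt
  have hk := pv_key l 0 [] 0 false
  simp only [Bool.false_eq_true, if_false] at hk
  cases l with
  | nil => rfl
  | cons v t =>
    simp only [List.length_cons, pvB_fill_length, hk]
    split <;> simp_all
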